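-- pv_equiv track=rewrite | github.com/Yadkee/dailyprogrammer | problems/[2018-03-16] Challenge #354 [Hard] Integer Complexity 3.py | complexities
-- ===== SOURCE A (Python) =====
-- def complexities(x):
--     """Adaptation of zatoichi49s answer to Integer complexity #2"""
--     d = {0: 0, 1: 1, 2: 2, 3: 3, 5: 5}
--     e = {0: "", 1: "1", 2: "2", 3: "3", 5: "5"}
--     for n in range(2, x + 1):
--         if n not in d or d[n-1] + 1 < d[n]:
--             d[n] = d[n-1] + 1
--             e[n] = "(%s+1)" % e[n-1]
--         for i in range(2, n + 1):
--             if i * n > x: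
--                 break
--             else:
--                 if n * i not in d or d[n] + d[i] < d[n*i]:
--                     d[n*i] = d[n] + d[i]
--                     e[n*i] = "%s*%s" % (e[n], e[i])
--     return tuple((d[i], e[i]) for i in sorted(d))
-- ===== SOURCE B (Python) =====
-- def complexities(x):
--     """Pull-based DP: for each m compute its own best from divisor pairs then the +1 edge."""
--     d = {0: 0, 1: 1, 2: 2, 3: 3, 5: 5}
--     e = {0: "", 1: "1", 2: "2", 3: "3", 5: "5"}
--     for m in range(2, x + 1):
--         # small factors b = 2..isqrt(m); process pairs by INCREASING larger factor a = m//b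
--         pairs = []
--         b = 2
--         while b * b <= m:
--             if m % b == 0:
--                 pairs.append((m // b, b))
--             b += 1
--         for a, b in reversed(pairs):
--             c = d[a] + d[b]
--             if m not in d or c < d[m]:
--                 d[m] = c
--                 e[m] = "%s*%s" % (e[a], e[b])
--         c = d[m - 1] + 1
--         if m not in d or c < d[m]:
--             d[m] = c
--             e[m] = "(%s+1)" % e[m - 1]
--     return tuple((d[i], e[i]) for i in sorted(d))
-- ===== Notes on version B (the rewrite author's own statement) =====
-- stated objective: alternative
-- what changed: A pushes updates to the entries of future products while scanning; B is a pull-based DP in which each entry computes its own best from its divisor factor-pairs, scanned via small factors up to its square root and applied in increasing larger-factor order to keep A's tie-breaking, followed by the additive edge from its predecessor.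
import Mathlib
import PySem

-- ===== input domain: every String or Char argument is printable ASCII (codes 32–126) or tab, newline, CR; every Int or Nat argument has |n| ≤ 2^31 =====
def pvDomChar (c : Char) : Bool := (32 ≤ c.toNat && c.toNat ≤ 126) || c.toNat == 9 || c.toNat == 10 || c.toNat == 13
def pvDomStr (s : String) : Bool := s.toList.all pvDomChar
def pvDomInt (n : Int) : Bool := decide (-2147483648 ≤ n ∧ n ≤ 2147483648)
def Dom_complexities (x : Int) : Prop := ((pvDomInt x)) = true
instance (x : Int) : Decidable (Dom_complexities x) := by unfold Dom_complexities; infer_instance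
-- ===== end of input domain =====

-- B replaces A's push-based product updates by a pull-based per-m divisor-pair scan (same values, same tie-breaking); alternative decomposition, not faster.


-- State shared by both ports: the pair of Python dicts (d, e).
abbrev CSt := PySem.Dict Int Int × PySem.Dict Int String

-- `if k not in d or v < d[k]: d[k] = v; e[k] = s` — the update shape both Pythons use verbatim.
def dupd (st : CSt) (k : Int) (v : Int) (s : String) : CSt :=
  if st.1.contains k = false ∨ v < st.1.getD k 0 then (st.1.insert k v, st.2.insert k s) else st

-- the literal seed dicts d = {0:0,1:1,2:2,3:3,5:5}, e = {0:"",...}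
def seedD : PySem.Dict Int Int := PySem.Dict.ofList [(0, 0), (1, 1), (2, 2), (3, 3), (5, 5)]
def seedE : PySem.Dict Int String := PySem.Dict.ofList [(0, ""), (1, "1"), (2, "2"), (3, "3"), (5, "5")]

-- ===== PORT A =====
-- inner `for i in range(2, n+1): if i*n > x: break; else: <update d[n*i]>`
def innerA (x n : Int) : List Int → CSt → CSt
  | [], st => st
  | i :: rest, st =>
    if i * n > x then st
    else innerA x n rest
      (dupd st (n * i) (st.1.getD n 0 + st.1.getD i 0) (st.2.getD n "" ++ "*" ++ st.2.getD i ""))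

-- one iteration of A's outer loop: additive check on n, then the product updates
def stepA (x : Int) (st : CSt) (n : Int) : CSt :=
  innerA x n (PySem.List.pyRange 2 (n + 1) 1)
    (dupd st n (st.1.getD (n - 1) 0 + 1) ("(" ++ st.2.getD (n - 1) "" ++ "+1)"))

def complexities (x : Int) : List (Int × String) :=
  let st := (PySem.List.pyRange 2 (x + 1) 1).foldl (stepA x) (seedD, seedE)
  (PySem.List.sorted st.1.keys (fun k => k) false).map (fun i => (st.1.getD i 0, st.2.getD i ""))

-- ===== PORT B =====
-- `b = 2; while b*b <= m: if m % b == 0: pairs.append((m//b, b)); b += 1`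
def pairsB (m b : Int) : List (Int × Int) :=
  if _h : b * b ≤ m then
    (if PySem.Int.mod m b = 0 then [(PySem.Int.floordiv m b, b)] else []) ++ pairsB m (b + 1)
  else []
termination_by (m + 1 - b).toNat
decreasing_by
  have hb : b ≤ m := by nlinarith [mul_self_nonneg b, mul_self_nonneg (b - 1)]
  omega

-- one iteration of B's loop over m: divisor pairs by increasing larger factor, then the +1 edge
def stepB (st : CSt) (m : Int) : CSt :=
  let st1 := ((pairsB m 2).reverse).foldl
    (fun st p =>
      dupd st m (st.1.getD p.1 0 + st.1.getD p.2 0) (st.2.getD p.1 "" ++ "*" ++ st.2.getD p.2 "")) st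
  dupd st1 m (st1.1.getD (m - 1) 0 + 1) ("(" ++ st1.2.getD (m - 1) "" ++ "+1)")

def complexities_alt (x : Int) : List (Int × String) :=
  let st := (PySem.List.pyRange 2 (x + 1) 1).foldl stepB (seedD, seedE)
  (PySem.List.sorted st.1.keys (fun k => k) false).map (fun i => (st.1.getD i 0, st.2.getD i ""))

-- ===== PRECONDITION & SPEC =====
def Spec_complexities (x : Int) (out : List (Int × String)) : Prop := out = complexities_alt x
instance (x : Int) (out : List (Int × String)) : Decidable (Spec_complexities x out) := by unfold Spec_complexities; infer_instance

-- ===== CLAIM (what is proved, stated in full; the proofs are below) =====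
def Claim_equal_complexities : Prop := ∀ (x : Int), Dom_complexities x → Spec_complexities x (complexities x)

-- ===== LEMMAS AND PROOFS =====

-- ---------- model of the DP table ----------

def updO (cur : Option (Int × String)) (c : Int × String) : Option (Int × String) :=
  match cur with
  | none => some c
  | some v => if c.1 < v.1 then some c else some v

def vOf (f : Int → Option (Int × String)) (k : Int) : Int × String := (f k).getD (0, "")

def mcand (f : Int → Option (Int × String)) (m a : Int) : Int × String :=
  ((vOf f a).1 + (vOf f (PySem.Int.floordiv m a)).1,
   (vOf f a).2 ++ "*" ++ (vOf f (PySem.Int.floordiv m a)).2)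

def acand (f : Int → Option (Int × String)) (m : Int) : Int × String :=
  ((vOf f (m - 1)).1 + 1, "(" ++ (vOf f (m - 1)).2 ++ "+1)")

def isLF (m a : Int) : Bool :=
  (PySem.Int.mod m a == 0) && decide (m ≤ a * a) && decide (2 * a ≤ m)

def afacs (m : Int) : List Int := (PySem.List.pyRange 2 m 1).filter (isLF m)

def seedF : Int → Option (Int × String) := fun k =>
  if k = 0 then some (0, "") else if k = 1 then some (1, "1") else if k = 2 then some (2, "2")
  else if k = 3 then some (3, "3") else if k = 5 then some (5, "5") else none

def finV (f : Int → Option (Int × String)) (m : Int) : Option (Int × String) :=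
  updO ((afacs m).foldl (fun c a => updO c (mcand f m a)) (seedF m)) (acand f m)

def tab : Nat → Int → Option (Int × String)
  | 0 => seedF
  | n + 1 => fun k => if k = (n : Int) + 1 then finV (tab n) ((n : Int) + 1) else tab n k

def ffin (k : Int) : Option (Int × String) := tab k.toNat k

def updAtF (G : Int → Option (Int × String)) (k : Int) (o : Option (Int × String)) :
    Int → Option (Int × String) := fun j => if j = k then o else G j

-- a state realises a table pointwise, with unique keys
def DE (st : CSt) (G : Int → Option (Int × String)) : Prop :=
  (∀ j, st.1.get? j = (G j).map Prod.fst) ∧ (∀ j, st.2.get? j = (G j).map Prod.snd) ∧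
  st.1.keys.Nodup ∧ st.2.keys.Nodup

theorem DE_congr {st : CSt} {G G' : Int → Option (Int × String)} (h : DE st G)
    (hg : ∀ j, G j = G' j) : DE st G' := by
  obtain ⟨h1, h2, h3, h4⟩ := h
  exact ⟨fun j => (h1 j).trans (by rw [hg]), fun j => (h2 j).trans (by rw [hg]), h3, h4⟩

theorem getD_map_fst (o : Option (Int × String)) : (o.map Prod.fst).getD 0 = (o.getD (0, "")).1 := by
  cases o <;> rfl

theorem getD_map_snd (o : Option (Int × String)) : (o.map Prod.snd).getD "" = (o.getD (0, "")).2 := by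
  cases o <;> rfl

theorem get?_dupd_proj {α : Type} {d : PySem.Dict Int α} {G : Int → Option (Int × String)}
    {p : Int × String → α} (hp : ∀ j, d.get? j = (G j).map p) (k : Int) (c : Int × String)
    (hcond : (G k).isSome = false ∨ ∀ v, G k = some v → c.1 < v.1) :
    ∀ j, (d.insert k (p c)).get? j = ((updAtF G k (updO (G k) c)) j).map p := by
  intro j
  rw [PySem.Dict.get?_insert]
  unfold updAtF
  rcases eq_or_ne j k with rfl | hjk
  · rw [if_pos rfl]
    cases hGk : G j with
    | none => simp [updO]
    | some v =>
      rw [hGk] at hcond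
      rcases hcond with hfalse | hlt
      · simp at hfalse
      · simp [updO, hlt v rfl]
  · simp only [if_neg hjk]
    exact hp j

theorem dupd_DE {st : CSt} {G : Int → Option (Int × String)} (h : DE st G) (k : Int) (c : Int × String) :
    DE (dupd st k c.1 c.2) (updAtF G k (updO (G k) c)) := by
  obtain ⟨h1, h2, h3, h4⟩ := h
  have hc : st.1.contains k = (G k).isSome := by
    rw [PySem.Dict.contains_eq_isSome_get?, h1 k, Option.isSome_map]
  have hgd : st.1.getD k 0 = ((G k).map Prod.fst).getD 0 := by
    rw [PySem.Dict.getD_eq_get?_getD, h1 k]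
  unfold dupd
  split
  · rename_i hcond
    rw [hc] at hcond
    have hcond' : (G k).isSome = false ∨ ∀ v, G k = some v → c.1 < v.1 := by
      rcases hcond with hf | hlt
      · exact Or.inl hf
      · right; intro v hv
        rw [hgd, hv] at hlt
        simpa using hlt
    exact ⟨get?_dupd_proj h1 k c hcond', get?_dupd_proj h2 k c hcond',
      PySem.Dict.nodup_keys_insert _ _ _ h3, PySem.Dict.nodup_keys_insert _ _ _ h4⟩
  · rename_i hcond
    rw [not_or, not_lt] at hcond
    obtain ⟨hcont, hge⟩ := hcond
    rw [hc] at hcont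
    cases hGk : G k with
    | none => rw [hGk] at hcont; simp at hcont
    | some v =>
      rw [hgd, hGk] at hge
      simp only [Option.map_some, Option.getD_some] at hge
      have hupd : updO (some v) c = some v := by
        simp [updO, not_lt.mpr hge]
      refine ⟨fun j => ?_, fun j => ?_, h3, h4⟩ <;>
        · unfold updAtF
          rw [hupd]
          rcases eq_or_ne j k with rfl | hjk
          · rw [if_pos rfl, ← hGk]; first | exact h1 j | exact h2 j
          · rw [if_neg hjk]; first | exact h1 j | exact h2 j

-- ---------- basic facts about tab ----------

theorem tab_gt : ∀ (n : Nat) (k : Int), (n : Int) < k → tab n k = seedF k := by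
  intro n
  induction n with
  | zero => intro k _; rfl
  | succ n ih =>
    intro k hk
    show (if k = (n : Int) + 1 then _ else tab n k) = _
    rw [if_neg (by push_cast at hk ⊢; omega), ih k (by push_cast at hk ⊢; omega)]

theorem tab_le_succ (n : Nat) (k : Int) (h : k ≤ (n : Int)) : tab (n + 1) k = tab n k := by
  show (if k = (n : Int) + 1 then _ else tab n k) = _
  rw [if_neg (by omega)]

theorem tab_eq_ffin : ∀ (n : Nat) (k : Int), k ≤ (n : Int) → tab n k = ffin k := by
  intro n
  induction n with
  | zero =>
    intro k hk
    unfold ffin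
    have h0 : k.toNat = 0 := by omega
    rw [h0]
  | succ n ih =>
    intro k hk
    by_cases hk2 : k ≤ (n : Int)
    · rw [tab_le_succ n k hk2, ih k hk2]
    · have hkk : k = (n : Int) + 1 := by omega
      subst hkk
      unfold ffin
      have h1 : ((n : Int) + 1).toNat = n + 1 := by omega
      rw [h1]

theorem finV_seedF_one : finV seedF 1 = seedF 1 := by
  unfold finV afacs
  rw [PySem.List.pyRange_one_eq_nil (by norm_num)]
  simp only [List.filter_nil, List.foldl_nil]
  have h1 : (acand seedF 1).1 = 1 := rfl
  show updO (some (1, "1")) _ = some (1, "1")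
  unfold updO
  rw [h1]
  norm_num

theorem tab_one (k : Int) : tab 1 k = seedF k := by
  show (if k = ((0 : Nat) : Int) + 1 then finV (tab 0) (((0 : Nat) : Int) + 1) else tab 0 k) = seedF k
  rcases eq_or_ne k 1 with rfl | hk
  · rw [if_pos (by norm_num)]
    have h01 : ((0 : Nat) : Int) + 1 = 1 := by norm_num
    rw [h01]
    exact finV_seedF_one
  · rw [if_neg (by push_cast; omega)]
    rfl

theorem mem_afacs {m a : Int} (ha : a ∈ afacs m) :
    2 ≤ a ∧ a < m ∧ PySem.Int.mod m a = 0 ∧ m ≤ a * a ∧ 2 * a ≤ m := by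
  unfold afacs at ha
  rw [List.mem_filter] at ha
  obtain ⟨hr, hLF⟩ := ha
  rw [PySem.List.mem_pyRange_one] at hr
  unfold isLF at hLF
  simp only [Bool.and_eq_true, beq_iff_eq, decide_eq_true_eq] at hLF
  exact ⟨hr.1, hr.2, hLF.1.1, hLF.1.2, hLF.2⟩

theorem floordiv_bounds {m a : Int} (hm : 0 < m) (ha : 2 ≤ a) :
    0 ≤ PySem.Int.floordiv m a ∧ PySem.Int.floordiv m a < m := by
  constructor
  · rw [PySem.Int.le_floordiv_iff_mul_le (by omega)]
    omega
  · rw [PySem.Int.floordiv_lt_iff_lt_mul (by omega)]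
    nlinarith

theorem finV_congr {f g : Int → Option (Int × String)} (m : Int) (hm : 2 ≤ m)
    (h : ∀ j, j < m → f j = g j) : finV f m = finV g m := by
  unfold finV
  have hac : acand f m = acand g m := by
    unfold acand vOf
    rw [h (m - 1) (by omega)]
  have hfold : ∀ a ∈ afacs m, ∀ c, updO c (mcand f m a) = updO c (mcand g m a) := by
    intro a ha c
    obtain ⟨ha2, ham, _, _, _⟩ := mem_afacs ha
    have hb := floordiv_bounds (show (0:Int) < m by omega) ha2
    unfold mcand vOf
    rw [h a ham, h (PySem.Int.floordiv m a) hb.2]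
  rw [hac]
  exact congrArg (fun z => updO z (acand g m)) (List.foldl_ext _ _ _ (fun c a ha => hfold a ha c))

theorem tab_succ_ffin (n : Nat) (hn : 1 ≤ n) :
    tab (n + 1) ((n : Int) + 1) = finV ffin ((n : Int) + 1) := by
  show (if ((n : Int) + 1) = (n : Int) + 1 then finV (tab n) ((n : Int) + 1) else _) = _
  rw [if_pos rfl]
  exact finV_congr _ (by omega) (fun j hj => tab_eq_ffin n j (by omega))

theorem seed_DE : DE (seedD, seedE) seedF := by
  refine ⟨fun j => ?_, fun j => ?_, ?_, ?_⟩
  · rcases eq_or_ne j 0 with rfl | h0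
    · rfl
    rcases eq_or_ne j 1 with rfl | h1
    · rfl
    rcases eq_or_ne j 2 with rfl | h2
    · rfl
    rcases eq_or_ne j 3 with rfl | h3
    · rfl
    rcases eq_or_ne j 5 with rfl | h5
    · rfl
    simp [seedD, seedF, PySem.Dict.ofList, PySem.Dict.update, PySem.Dict.get?_insert, h0, h1, h2, h3, h5]
  · rcases eq_or_ne j 0 with rfl | h0
    · rfl
    rcases eq_or_ne j 1 with rfl | h1
    · rfl
    rcases eq_or_ne j 2 with rfl | h2
    · rfl
    rcases eq_or_ne j 3 with rfl | h3
    · rfl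
    rcases eq_or_ne j 5 with rfl | h5
    · rfl
    simp [seedE, seedF, PySem.Dict.ofList, PySem.Dict.update, PySem.Dict.get?_insert, h0, h1, h2, h3, h5]
  · exact PySem.Dict.nodup_keys_ofList _
  · exact PySem.Dict.nodup_keys_ofList _

-- ---------- B side ----------

theorem pairwise_imp_mem {l : List Int} {R S : Int → Int → Prop} (h : l.Pairwise R)
    (him : ∀ a ∈ l, ∀ b ∈ l, R a b → S a b) : l.Pairwise S := by
  induction l with
  | nil => exact List.Pairwise.nil
  | cons a rest ih =>
    rw [List.pairwise_cons] at h ⊢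
    exact ⟨fun b hb => him a List.mem_cons_self b (List.mem_cons_of_mem a hb) (h.1 b hb),
      ih h.2 (fun u hu v hv => him u (List.mem_cons_of_mem a hu) v (List.mem_cons_of_mem a hv))⟩

theorem fd_exact {m a b : Int} (hb : 0 < b) (h : m = a * b) : PySem.Int.floordiv m b = a := by
  rw [PySem.Int.floordiv_eq_iff_of_pos hb]
  have hr : (a + 1) * b = a * b + b := by ring
  constructor
  · exact le_of_eq h.symm
  · rw [hr]; omega

theorem dvd_of_mod {m b : Int} (h : PySem.Int.mod m b = 0) : ∃ c, m = c * b := by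
  obtain ⟨c, hc⟩ := (PySem.Int.mod_eq_zero_iff_dvd m b).mp h
  exact ⟨c, by rw [hc, mul_comm]⟩

theorem mod_of_eq_mul {m a b : Int} (h : m = a * b) : PySem.Int.mod m a = 0 :=
  (PySem.Int.mod_eq_zero_iff_dvd m a).mpr ⟨b, h⟩

def sfacs (m : Int) : List Int :=
  (PySem.List.pyRange 2 m 1).filter (fun b => decide (b * b ≤ m) && (PySem.Int.mod m b == 0))

theorem mem_sfacs {m b : Int} :
    b ∈ sfacs m ↔ 2 ≤ b ∧ b < m ∧ b * b ≤ m ∧ PySem.Int.mod m b = 0 := by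
  unfold sfacs
  rw [List.mem_filter, PySem.List.mem_pyRange_one]
  simp only [Bool.and_eq_true, decide_eq_true_eq, beq_iff_eq]
  tauto

theorem pairsB_eq_aux (m : Int) : ∀ (fuel : Nat) (b0 : Int), 2 ≤ b0 → (m - b0).toNat ≤ fuel →
    pairsB m b0 = ((PySem.List.pyRange b0 m 1).filter
      (fun b => decide (b * b ≤ m) && (PySem.Int.mod m b == 0))).map
      (fun b => (PySem.Int.floordiv m b, b)) := by
  intro fuel
  induction fuel with
  | zero =>
    intro b0 hb0 hf
    have hmb : m ≤ b0 := by omega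
    rw [pairsB, dif_neg (by nlinarith), PySem.List.pyRange_one_eq_nil hmb]
    rfl
  | succ fuel ih =>
    intro b0 hb0 hf
    rw [pairsB]
    by_cases h : b0 * b0 ≤ m
    · rw [dif_pos h]
      have hlt : b0 < m := by nlinarith
      rw [PySem.List.pyRange_one_cons hlt, List.filter_cons,
        ih (b0 + 1) (by omega) (by omega)]
      by_cases hm0 : PySem.Int.mod m b0 = 0
      · simp [h, hm0]
      · simp [h, hm0]
    · rw [dif_neg h]
      symm
      rw [List.map_eq_nil_iff, List.filter_eq_nil_iff]
      intro b hb
      rw [PySem.List.mem_pyRange_one] at hb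
      simp only [Bool.and_eq_true, decide_eq_true_eq, beq_iff_eq, not_and]
      intro hbb
      exact absurd hbb (by nlinarith)

theorem pairsB_eq (m : Int) :
    pairsB m 2 = (sfacs m).map (fun b => (PySem.Int.floordiv m b, b)) :=
  pairsB_eq_aux m (m - 2).toNat 2 (by omega) (by omega)

theorem sfacs_pairwise (m : Int) : (sfacs m).Pairwise (· < ·) :=
  List.Pairwise.filter _ (PySem.List.pairwise_lt_pyRange_one 2 m)

theorem afacs_pairwise (m : Int) : (afacs m).Pairwise (· < ·) :=
  List.Pairwise.filter _ (PySem.List.pairwise_lt_pyRange_one 2 m)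

theorem isLF_true {m a : Int} (h1 : PySem.Int.mod m a = 0) (h2 : m ≤ a * a) (h3 : 2 * a ≤ m) :
    isLF m a = true := by
  unfold isLF
  simp [h1, h2, h3]

theorem mem_afacs_intro {m a : Int} (h0 : 2 ≤ a) (h1 : a < m) (h2 : PySem.Int.mod m a = 0)
    (h3 : m ≤ a * a) (h4 : 2 * a ≤ m) : a ∈ afacs m := by
  unfold afacs
  rw [List.mem_filter, PySem.List.mem_pyRange_one]
  exact ⟨⟨h0, h1⟩, isLF_true h2 h3 h4⟩

-- b small factor → a = m//b is a larger factor, and the two maps invert each other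
theorem sfacs_to_afacs {m b : Int} (hb : b ∈ sfacs m) :
    PySem.Int.floordiv m b ∈ afacs m ∧ PySem.Int.floordiv m (PySem.Int.floordiv m b) = b := by
  obtain ⟨hb2, hbm, hbb, hbmod⟩ := mem_sfacs.mp hb
  obtain ⟨c, hc⟩ := dvd_of_mod hbmod
  have hfd : PySem.Int.floordiv m b = c := fd_exact (by omega) hc
  have hcb : b ≤ c := by nlinarith
  have hc2 : 2 ≤ c := by omega
  have hcm : c < m := by nlinarith
  rw [hfd]
  refine ⟨mem_afacs_intro hc2 hcm (mod_of_eq_mul hc) (by nlinarith) (by nlinarith), ?_⟩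
  exact fd_exact (by omega) (by rw [hc]; ring)

theorem afacs_to_sfacs {m a : Int} (ha : a ∈ afacs m) :
    PySem.Int.floordiv m a ∈ sfacs m ∧ PySem.Int.floordiv m (PySem.Int.floordiv m a) = a := by
  obtain ⟨ha2, ham, hamod, haa, h2a⟩ := mem_afacs ha
  obtain ⟨c, hc⟩ := dvd_of_mod hamod
  have hfd : PySem.Int.floordiv m a = c := fd_exact (by omega) hc
  have hc2 : 2 ≤ c := by nlinarith
  have hca : c ≤ a := by nlinarith
  have hcm : c < m := by nlinarith
  rw [hfd]
  refine ⟨mem_sfacs.mpr ⟨hc2, hcm, by nlinarith, mod_of_eq_mul hc⟩, ?_⟩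
  exact fd_exact (by omega) (by rw [hc]; ring)

theorem afacs_eq_rev_sfacs (m : Int) :
    afacs m = (sfacs m).reverse.map (fun b => PySem.Int.floordiv m b) := by
  have hAFp : (afacs m).Pairwise (· < ·) := afacs_pairwise m
  have hanti : ∀ a ∈ sfacs m, ∀ b ∈ sfacs m, a < b →
      PySem.Int.floordiv m b < PySem.Int.floordiv m a := by
    intro a ha b hb hab
    obtain ⟨ha2, _, _, hamod⟩ := mem_sfacs.mp ha
    obtain ⟨hb2, _, hbb, hbmod⟩ := mem_sfacs.mp hb
    obtain ⟨ca, hca⟩ := dvd_of_mod hamod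
    obtain ⟨cb, hcb⟩ := dvd_of_mod hbmod
    rw [fd_exact (by omega : (0:Int) < a) hca, fd_exact (by omega : (0:Int) < b) hcb]
    have hcb0 : 0 < cb := by nlinarith
    nlinarith [mul_lt_mul_of_pos_left hab hcb0]
  have hRp : ((sfacs m).reverse.map (fun b => PySem.Int.floordiv m b)).Pairwise (· < ·) := by
    rw [List.pairwise_map, List.pairwise_reverse]
    exact pairwise_imp_mem (sfacs_pairwise m) (fun a ha b hb hab => hanti a ha b hb hab)
  have hmem : ∀ x, x ∈ (sfacs m).reverse.map (fun b => PySem.Int.floordiv m b) ↔ x ∈ afacs m := by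
    intro x
    rw [List.mem_map]
    constructor
    · rintro ⟨b, hb, rfl⟩
      exact (sfacs_to_afacs (List.mem_reverse.mp hb)).1
    · intro hx
      refine ⟨PySem.Int.floordiv m x, List.mem_reverse.mpr (afacs_to_sfacs hx).1,
        (afacs_to_sfacs hx).2⟩
  have hperm : ((sfacs m).reverse.map (fun b => PySem.Int.floordiv m b)).Perm (afacs m) := by
    refine (List.perm_ext_iff_of_nodup ?_ ?_).mpr hmem
    · exact hRp.imp (fun h => ne_of_lt h)
    · exact hAFp.imp (fun h => ne_of_lt h)
  have h1 := PySem.List.sorted_eq_of_perm_of_pairwise_lt (xs := afacs m) (key := fun k => k)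
    (ys := afacs m) (List.Perm.refl _) hAFp
  have h2 := PySem.List.sorted_eq_of_perm_of_pairwise_lt (xs := afacs m) (key := fun k => k)
    (ys := (sfacs m).reverse.map (fun b => PySem.Int.floordiv m b)) hperm hRp
  rw [← h1, h2]

theorem revPairs_eq (m : Int) :
    (pairsB m 2).reverse = (afacs m).map (fun a => (a, PySem.Int.floordiv m a)) := by
  rw [pairsB_eq, ← List.map_reverse, afacs_eq_rev_sfacs, List.map_map]
  refine List.map_congr_left ?_
  intro b hb
  have hb' := List.mem_reverse.mp hb
  obtain ⟨_, hinv⟩ := sfacs_to_afacs hb'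
  simp only [Function.comp_apply]
  rw [hinv]

theorem updAtF_self (G : Int → Option (Int × String)) (k : Int) (o : Option (Int × String)) :
    updAtF G k o k = o := by
  unfold updAtF; rw [if_pos rfl]

theorem updAtF_ne (G : Int → Option (Int × String)) (k : Int) (o : Option (Int × String))
    {j : Int} (h : j ≠ k) : updAtF G k o j = G j := by
  unfold updAtF; rw [if_neg h]

theorem updAtF_idem (G : Int → Option (Int × String)) (k : Int) (o o' : Option (Int × String))
    (j : Int) : updAtF (updAtF G k o) k o' j = updAtF G k o' j := by
  unfold updAtF
  by_cases hj : j = k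
  · rw [if_pos hj, if_pos hj]
  · rw [if_neg hj, if_neg hj, if_neg hj]

theorem DE_read_fst {st : CSt} {G : Int → Option (Int × String)} (h : DE st G) (j : Int) :
    st.1.getD j 0 = (vOf G j).1 := by
  rw [PySem.Dict.getD_eq_get?_getD, h.1 j, getD_map_fst]
  rfl

theorem DE_read_snd {st : CSt} {G : Int → Option (Int × String)} (h : DE st G) (j : Int) :
    st.2.getD j "" = (vOf G j).2 := by
  rw [PySem.Dict.getD_eq_get?_getD, h.2.1 j, getD_map_snd]
  rfl

theorem B_fold (m : Int) (_hm : 0 < m) :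
    ∀ (l : List Int) (st : CSt) (G : Int → Option (Int × String)) (cur : Option (Int × String)),
    (∀ a ∈ l, 2 ≤ a ∧ a < m ∧ 0 ≤ PySem.Int.floordiv m a ∧ PySem.Int.floordiv m a < m) →
    DE st (updAtF G m cur) →
    DE ((l.map (fun a => (a, PySem.Int.floordiv m a))).foldl
        (fun st p => dupd st m (st.1.getD p.1 0 + st.1.getD p.2 0)
          (st.2.getD p.1 "" ++ "*" ++ st.2.getD p.2 "")) st)
      (updAtF G m (l.foldl (fun c a => updO c (mcand G m a)) cur)) := by
  intro l
  induction l with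
  | nil => intro st G cur _ h; simpa using h
  | cons a rest ih =>
    intro st G cur hb h
    obtain ⟨ha2, ham, hq0, hqm⟩ := hb a List.mem_cons_self
    simp only [List.map_cons, List.foldl_cons]
    have e1 : st.1.getD a 0 = (vOf G a).1 := by
      rw [DE_read_fst h a]
      unfold vOf
      rw [updAtF_ne _ _ _ (show a ≠ m by omega)]
    have e2 : st.1.getD (PySem.Int.floordiv m a) 0 = (vOf G (PySem.Int.floordiv m a)).1 := by
      rw [DE_read_fst h _]
      unfold vOf
      rw [updAtF_ne _ _ _ (show PySem.Int.floordiv m a ≠ m by omega)]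
    have e3 : st.2.getD a "" = (vOf G a).2 := by
      rw [DE_read_snd h a]
      unfold vOf
      rw [updAtF_ne _ _ _ (show a ≠ m by omega)]
    have e4 : st.2.getD (PySem.Int.floordiv m a) "" = (vOf G (PySem.Int.floordiv m a)).2 := by
      rw [DE_read_snd h _]
      unfold vOf
      rw [updAtF_ne _ _ _ (show PySem.Int.floordiv m a ≠ m by omega)]
    rw [e1, e2, e3, e4]
    have hd := dupd_DE h m (mcand G m a)
    rw [updAtF_self] at hd
    have hd' : DE (dupd st m (mcand G m a).1 (mcand G m a).2)
        (updAtF G m (updO cur (mcand G m a))) :=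
      DE_congr hd (updAtF_idem _ _ _ _)
    exact ih _ G (updO cur (mcand G m a)) (fun b hbmem => hb b (List.mem_cons_of_mem a hbmem)) hd'

theorem dupd_acand_DE {st : CSt} {G : Int → Option (Int × String)} (m : Int) (h : DE st G) :
    DE (dupd st m (st.1.getD (m - 1) 0 + 1) ("(" ++ st.2.getD (m - 1) "" ++ "+1)"))
      (updAtF G m (updO (G m) (acand G m))) := by
  rw [DE_read_fst h (m - 1), DE_read_snd h (m - 1)]
  exact dupd_DE h m (acand G m)

theorem stepB_tab (n : Nat) (hn : 1 ≤ n) {st : CSt} (h : DE st (tab n)) :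
    DE (stepB st ((n : Int) + 1)) (tab (n + 1)) := by
  simp only [stepB]
  rw [revPairs_eq]
  have h0 : DE st (updAtF (tab n) ((n : Int) + 1) (seedF ((n : Int) + 1))) := by
    refine DE_congr h (fun j => ?_)
    unfold updAtF
    by_cases hj : j = (n : Int) + 1
    · rw [if_pos hj, hj, tab_gt n _ (by omega)]
    · rw [if_neg hj]
  have hb : ∀ a ∈ afacs ((n : Int) + 1), 2 ≤ a ∧ a < (n : Int) + 1 ∧
      0 ≤ PySem.Int.floordiv ((n : Int) + 1) a ∧ PySem.Int.floordiv ((n : Int) + 1) a < (n : Int) + 1 := by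
    intro a ha
    obtain ⟨h2a, ham, _, _, _⟩ := mem_afacs ha
    have hfb := floordiv_bounds (show (0 : Int) < (n : Int) + 1 by omega) h2a
    exact ⟨h2a, ham, hfb.1, hfb.2⟩
  have h1 := B_fold ((n : Int) + 1) (by omega) (afacs ((n : Int) + 1)) st (tab n)
    (seedF ((n : Int) + 1)) hb h0
  have h2 := dupd_acand_DE ((n : Int) + 1) h1
  refine DE_congr h2 (fun j => ?_)
  rw [updAtF_self] at h2 ⊢
  have hac : acand (updAtF (tab n) ((n : Int) + 1)
      ((afacs ((n : Int) + 1)).foldl (fun c a => updO c (mcand (tab n) ((n : Int) + 1) a))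
        (seedF ((n : Int) + 1)))) ((n : Int) + 1) = acand (tab n) ((n : Int) + 1) := by
    unfold acand vOf
    rw [updAtF_ne _ _ _ (show (n : Int) + 1 - 1 ≠ (n : Int) + 1 by omega)]
  rw [hac, updAtF_idem]
  show updAtF (tab n) ((n : Int) + 1) (finV (tab n) ((n : Int) + 1)) j = tab (n + 1) j
  simp only [tab]
  unfold updAtF
  by_cases hj : j = (n : Int) + 1
  · rw [if_pos hj]
  · rw [if_neg hj]

theorem B_outer : ∀ (n : Nat),
    DE ((PySem.List.pyRange 2 ((n : Int) + 1) 1).foldl stepB (seedD, seedE)) (tab n) := by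
  intro n
  induction n with
  | zero =>
    rw [PySem.List.pyRange_one_eq_nil (by norm_num)]
    exact seed_DE
  | succ n ih =>
    rcases Nat.eq_zero_or_pos n with rfl | hn
    · rw [PySem.List.pyRange_one_eq_nil (by norm_num)]
      exact DE_congr seed_DE (fun j => (tab_one j).symm)
    · have hcast : ((n + 1 : Nat) : Int) + 1 = ((n : Int) + 1) + 1 := by push_cast; ring
      rw [hcast, PySem.List.pyRange_one_succ_right (by omega), List.foldl_append]
      simp only [List.foldl_cons, List.foldl_nil]
      exact stepB_tab n hn ih

-- ---------- A side ----------

def afacsUpTo (n : Nat) (k : Int) : List Int :=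
  (PySem.List.pyRange 2 ((n : Int) + 1) 1).filter (isLF k)

def partialV (n : Nat) (k : Int) : Option (Int × String) :=
  (afacsUpTo n k).foldl (fun c a => updO c (mcand ffin k a)) (seedF k)

def aval (x : Int) (n : Nat) : Int → Option (Int × String) := fun k =>
  if k ≤ (n : Int) then tab n k else if 2 ≤ k ∧ k ≤ x then partialV n k else seedF k

def gstep (x m : Int) (g : Int → Option (Int × String)) (i : Int) : Int → Option (Int × String) :=
  if m * i ≤ x then updAtF g (m * i) (updO (g (m * i)) (mcand ffin (m * i) m)) else g

theorem foldG_skip (x m : Int) :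
    ∀ (l : List Int) (G : Int → Option (Int × String)), (∀ j ∈ l, ¬ (m * j ≤ x)) →
    l.foldl (gstep x m) G = G := by
  intro l
  induction l with
  | nil => intro G _; rfl
  | cons a t ih =>
    intro G hl
    simp only [List.foldl_cons]
    have ha : gstep x m G a = G := by
      unfold gstep
      rw [if_neg (hl a List.mem_cons_self)]
    rw [ha]
    exact ih G (fun j hj => hl j (List.mem_cons_of_mem a hj))

theorem innerA_DE (x m : Int) (hm : 2 ≤ m) :
    ∀ (l : List Int) (st : CSt) (G : Int → Option (Int × String)),
    (∀ i ∈ l, 2 ≤ i ∧ i ≤ m) → l.Pairwise (· < ·) →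
    G m = ffin m → (∀ i ∈ l, G i = ffin i) → DE st G →
    DE (innerA x m l st) (l.foldl (gstep x m) G) := by
  intro l
  induction l with
  | nil => intro st G _ _ _ _ h; exact h
  | cons i rest ih =>
    intro st G hmem hpw hGm hGi h
    obtain ⟨hi2, him⟩ := hmem i List.mem_cons_self
    rw [List.pairwise_cons] at hpw
    simp only [innerA]
    by_cases hbreak : i * m > x
    · rw [if_pos hbreak]
      have hall : ∀ j ∈ i :: rest, ¬ (m * j ≤ x) := by
        intro j hj
        rcases List.mem_cons.mp hj with rfl | hjr
        · rw [mul_comm]; omega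
        · have hij : i < j := hpw.1 j hjr
          have : i * m < j * m := by nlinarith
          rw [mul_comm]; omega
      rw [foldG_skip x m (i :: rest) G hall]
      exact h
    · rw [if_neg hbreak]
      have hmx : m * i ≤ x := by rw [mul_comm]; omega
      have hfdi : PySem.Int.floordiv (m * i) m = i := fd_exact (by omega) (by ring)
      have hmmi : m < m * i := by nlinarith
      have e1 : st.1.getD m 0 = (vOf ffin m).1 := by
        rw [DE_read_fst h m]
        unfold vOf
        rw [hGm]
      have e2 : st.1.getD i 0 = (vOf ffin (PySem.Int.floordiv (m * i) m)).1 := by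
        rw [DE_read_fst h i]
        unfold vOf
        rw [hGi i List.mem_cons_self, hfdi]
      have e3 : st.2.getD m "" = (vOf ffin m).2 := by
        rw [DE_read_snd h m]
        unfold vOf
        rw [hGm]
      have e4 : st.2.getD i "" = (vOf ffin (PySem.Int.floordiv (m * i) m)).2 := by
        rw [DE_read_snd h i]
        unfold vOf
        rw [hGi i List.mem_cons_self, hfdi]
      rw [e1, e2, e3, e4]
      have hd := dupd_DE h (m * i) (mcand ffin (m * i) m)
      simp only [List.foldl_cons]
      have hgs : gstep x m G i = updAtF G (m * i) (updO (G (m * i)) (mcand ffin (m * i) m)) := by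
        unfold gstep
        rw [if_pos hmx]
      rw [hgs]
      refine ih _ _ (fun j hj => hmem j (List.mem_cons_of_mem i hj)) hpw.2 ?_ ?_ hd
      · rw [updAtF_ne _ _ _ (show m ≠ m * i by omega)]
        exact hGm
      · intro j hj
        have hjm : j ≤ m := (hmem j (List.mem_cons_of_mem i hj)).2
        rw [updAtF_ne _ _ _ (show j ≠ m * i by omega)]
        exact hGi j (List.mem_cons_of_mem i hj)

theorem foldG_at (x m : Int) :
    ∀ (l : List Int) (G : Int → Option (Int × String)) (k : Int),
    (l.foldl (gstep x m) G) k =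
      (l.filter (fun i => decide (m * i = k) && decide (m * i ≤ x))).foldl
        (fun c _ => updO c (mcand ffin k m)) (G k) := by
  intro l
  induction l with
  | nil => intro G k; rfl
  | cons i rest ih =>
    intro G k
    simp only [List.foldl_cons, List.filter_cons]
    by_cases hx : m * i ≤ x
    · by_cases hk : m * i = k
      · rw [if_pos (by subst hk; simp [hx])]
        have hgs : gstep x m G i = updAtF G (m * i) (updO (G (m * i)) (mcand ffin (m * i) m)) := by
          unfold gstep
          rw [if_pos hx]
        rw [hgs, ih]
        subst hk
        rw [updAtF_self, List.foldl_cons]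
      · rw [if_neg (by simp [hk])]
        have hgs : gstep x m G i = updAtF G (m * i) (updO (G (m * i)) (mcand ffin (m * i) m)) := by
          unfold gstep
          rw [if_pos hx]
        rw [hgs, ih, updAtF_ne _ _ _ (fun hkk => hk hkk.symm)]
    · rw [if_neg (by simp [hx])]
      have hgs : gstep x m G i = G := by
        unfold gstep
        rw [if_neg hx]
      rw [hgs, ih]

theorem filter_unique {p : Int → Bool} {c : Int} :
    ∀ {l : List Int}, l.Pairwise (· < ·) → c ∈ l → (∀ i ∈ l, p i = true ↔ i = c) →
    l.filter p = [c] := by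
  intro l
  induction l with
  | nil => intro _ hc _; cases hc
  | cons a t ih =>
    intro hpw hc hp
    rw [List.pairwise_cons] at hpw
    rw [List.filter_cons]
    rcases List.mem_cons.mp hc with heq | hct
    · subst heq
      rw [if_pos ((hp c List.mem_cons_self).mpr rfl)]
      have ht : t.filter p = [] := by
        rw [List.filter_eq_nil_iff]
        intro i hi hpi
        have hic : i = c := (hp i (List.mem_cons_of_mem c hi)).mp hpi
        have := hpw.1 i hi
        omega
      rw [ht]
    · have hpa : ¬ (p a = true) := by
        intro hpa
        have : a = c := (hp a List.mem_cons_self).mp hpa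
        have := hpw.1 c hct
        omega
      rw [if_neg hpa]
      exact ih hpw.2 hct (fun i hi => hp i (List.mem_cons_of_mem a hi))

theorem aval_zero (x : Int) (j : Int) : aval x 0 j = seedF j := by
  unfold aval
  by_cases h0 : j ≤ ((0 : Nat) : Int)
  · rw [if_pos h0]; rfl
  · rw [if_neg h0]
    by_cases h2 : 2 ≤ j ∧ j ≤ x
    · rw [if_pos h2]
      unfold partialV afacsUpTo
      rw [PySem.List.pyRange_one_eq_nil (by norm_num)]
      rfl
    · rw [if_neg h2]

theorem aval_one (x : Int) (j : Int) : aval x 1 j = seedF j := by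
  unfold aval
  by_cases h0 : j ≤ ((1 : Nat) : Int)
  · rw [if_pos h0]
    exact tab_one j
  · rw [if_neg h0]
    by_cases h2 : 2 ≤ j ∧ j ≤ x
    · rw [if_pos h2]
      unfold partialV afacsUpTo
      rw [PySem.List.pyRange_one_eq_nil (by norm_num)]
      rfl
    · rw [if_neg h2]

theorem stepA_inv (x : Int) (n : Nat) (hn : 1 ≤ n) (hx : (n : Int) + 1 ≤ x) {st : CSt}
    (h : DE st (aval x n)) : DE (stepA x st ((n : Int) + 1)) (aval x (n + 1)) := by
  have hm2 : (2 : Int) ≤ (n : Int) + 1 := by omega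
  simp only [stepA]
  have h1 := dupd_acand_DE ((n : Int) + 1) h
  have havm : aval x n ((n : Int) + 1) = partialV n ((n : Int) + 1) := by
    unfold aval
    rw [if_neg (by omega), if_pos ⟨by omega, hx⟩]
  have hacand : acand (aval x n) ((n : Int) + 1) = acand ffin ((n : Int) + 1) := by
    unfold acand vOf
    have hr : aval x n ((n : Int) + 1 - 1) = ffin ((n : Int) + 1 - 1) := by
      unfold aval
      rw [if_pos (by omega)]
      exact tab_eq_ffin n _ (by omega)
    rw [hr]
  have hfin : updO (partialV n ((n : Int) + 1)) (acand ffin ((n : Int) + 1)) = ffin ((n : Int) + 1) := by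
    have heq : updO (partialV n ((n : Int) + 1)) (acand ffin ((n : Int) + 1)) =
        finV ffin ((n : Int) + 1) := rfl
    rw [heq, ← tab_succ_ffin n hn]
    unfold ffin
    have ht : (((n : Int) + 1)).toNat = n + 1 := by omega
    rw [ht]
  have h1' : DE (dupd st ((n : Int) + 1) (st.1.getD ((n : Int) + 1 - 1) 0 + 1)
      ("(" ++ st.2.getD ((n : Int) + 1 - 1) "" ++ "+1)"))
      (updAtF (aval x n) ((n : Int) + 1) (ffin ((n : Int) + 1))) := by
    refine DE_congr h1 (fun j => ?_)
    by_cases hj : j = (n : Int) + 1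
    · rw [hj, updAtF_self, updAtF_self, havm, hacand, hfin]
    · rw [updAtF_ne _ _ _ hj, updAtF_ne _ _ _ hj]
  have hinner := innerA_DE x ((n : Int) + 1) hm2 (PySem.List.pyRange 2 ((n : Int) + 1 + 1) 1) _
    (updAtF (aval x n) ((n : Int) + 1) (ffin ((n : Int) + 1)))
    (fun i hi => by rw [PySem.List.mem_pyRange_one] at hi; exact ⟨hi.1, by omega⟩)
    (PySem.List.pairwise_lt_pyRange_one 2 ((n : Int) + 1 + 1))
    (updAtF_self _ _ _)
    (fun i hi => by
      rw [PySem.List.mem_pyRange_one] at hi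
      by_cases hii : i = (n : Int) + 1
      · rw [hii, updAtF_self]
      · rw [updAtF_ne _ _ _ hii]
        unfold aval
        rw [if_pos (by omega)]
        exact tab_eq_ffin n i (by omega))
    h1'
  refine DE_congr hinner (fun k => ?_)
  rw [foldG_at]
  by_cases hk : k ≤ (n : Int) + 1
  · -- no product with factors ≥ 2 hits k ≤ m
    have hnil : (PySem.List.pyRange 2 ((n : Int) + 1 + 1) 1).filter
        (fun i => decide (((n : Int) + 1) * i = k) && decide (((n : Int) + 1) * i ≤ x)) = [] := by
      rw [List.filter_eq_nil_iff]
      intro i hi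
      rw [PySem.List.mem_pyRange_one] at hi
      have : ((n : Int) + 1) * 2 ≤ ((n : Int) + 1) * i := by nlinarith
      simp only [Bool.and_eq_true, decide_eq_true_eq, not_and]
      intro hik
      omega
    rw [hnil]
    show updAtF (aval x n) ((n : Int) + 1) (ffin ((n : Int) + 1)) k = aval x (n + 1) k
    by_cases hkm : k = (n : Int) + 1
    · rw [hkm, updAtF_self]
      unfold aval
      rw [if_pos (by push_cast; omega)]
      exact (tab_eq_ffin (n + 1) _ (by push_cast; omega)).symm
    · rw [updAtF_ne _ _ _ hkm]
      unfold aval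
      rw [if_pos (by omega), if_pos (by push_cast; omega)]
      rw [tab_eq_ffin n k (by omega), tab_eq_ffin (n + 1) k (by push_cast; omega)]
  · have hGk : updAtF (aval x n) ((n : Int) + 1) (ffin ((n : Int) + 1)) k = aval x n k :=
      updAtF_ne _ _ _ (by omega)
    by_cases hkx : k ≤ x
    · -- partial region
      have havk : aval x n k = partialV n k := by
        unfold aval
        rw [if_neg (by omega), if_pos ⟨by omega, hkx⟩]
      have havk' : aval x (n + 1) k = partialV (n + 1) k := by
        unfold aval
        rw [if_neg (by push_cast; omega), if_pos ⟨by omega, hkx⟩]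
      rw [hGk, havk, havk']
      have hsplit : afacsUpTo (n + 1) k = afacsUpTo n k ++
          (if isLF k ((n : Int) + 1) then [(n : Int) + 1] else []) := by
        unfold afacsUpTo
        have hc : ((n + 1 : Nat) : Int) + 1 = ((n : Int) + 1) + 1 := by push_cast; ring
        rw [hc, PySem.List.pyRange_one_succ_right (by omega), List.filter_append]
        congr 1
        rw [List.filter_cons, List.filter_nil]
      by_cases hLF : isLF k ((n : Int) + 1) = true
      · -- exactly one update hits k
        obtain ⟨hkmod, hksq, h2k⟩ : PySem.Int.mod k ((n : Int) + 1) = 0 ∧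
            k ≤ ((n : Int) + 1) * ((n : Int) + 1) ∧ 2 * ((n : Int) + 1) ≤ k := by
          unfold isLF at hLF
          simp only [Bool.and_eq_true, beq_iff_eq, decide_eq_true_eq] at hLF
          exact ⟨hLF.1.1, hLF.1.2, hLF.2⟩
        obtain ⟨c, hc⟩ := dvd_of_mod hkmod
        have hc2 : 2 ≤ c := by nlinarith
        have hcm : c ≤ (n : Int) + 1 := by nlinarith
        have hfu : (PySem.List.pyRange 2 ((n : Int) + 1 + 1) 1).filter
            (fun i => decide (((n : Int) + 1) * i = k) && decide (((n : Int) + 1) * i ≤ x)) = [c] := by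
          refine filter_unique (PySem.List.pairwise_lt_pyRange_one _ _)
            (PySem.List.mem_pyRange_one.mpr ⟨hc2, by omega⟩) ?_
          intro i hi
          rw [PySem.List.mem_pyRange_one] at hi
          simp only [Bool.and_eq_true, decide_eq_true_eq]
          constructor
          · rintro ⟨hik, _⟩
            have hiceq : ((n : Int) + 1) * i = ((n : Int) + 1) * c := by rw [hik, hc]; ring
            exact mul_left_cancel₀ (by omega) hiceq
          · intro hic
            have hck : ((n : Int) + 1) * c = k := by rw [hc]; ring
            rw [hic]
            exact ⟨hck, by omega⟩
        have hps : partialV (n + 1) k = updO (partialV n k) (mcand ffin k ((n : Int) + 1)) := by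
          show (afacsUpTo (n + 1) k).foldl (fun c a => updO c (mcand ffin k a)) (seedF k) = _
          rw [hsplit, if_pos hLF, List.foldl_append]
          rfl
        rw [hfu, hps]
        simp only [List.foldl_cons, List.foldl_nil]
      · have hnil : (PySem.List.pyRange 2 ((n : Int) + 1 + 1) 1).filter
            (fun i => decide (((n : Int) + 1) * i = k) && decide (((n : Int) + 1) * i ≤ x)) = [] := by
          rw [List.filter_eq_nil_iff]
          intro i hi
          rw [PySem.List.mem_pyRange_one] at hi
          simp only [Bool.and_eq_true, decide_eq_true_eq, not_and]
          intro hik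
          exfalso
          apply hLF
          have hkm : k = ((n : Int) + 1) * i := hik.symm
          refine isLF_true (mod_of_eq_mul hkm) ?_ ?_
          · nlinarith
          · nlinarith
        have hps : partialV (n + 1) k = partialV n k := by
          show (afacsUpTo (n + 1) k).foldl (fun c a => updO c (mcand ffin k a)) (seedF k) = _
          rw [hsplit, if_neg hLF, List.append_nil]
          rfl
        rw [hnil, hps]
        rfl
    · -- beyond x : nothing ever written
      have hnil : (PySem.List.pyRange 2 ((n : Int) + 1 + 1) 1).filter
          (fun i => decide (((n : Int) + 1) * i = k) && decide (((n : Int) + 1) * i ≤ x)) = [] := by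
        rw [List.filter_eq_nil_iff]
        intro i hi
        simp only [Bool.and_eq_true, decide_eq_true_eq, not_and]
        intro hik
        omega
      rw [hnil, hGk]
      show aval x n k = aval x (n + 1) k
      unfold aval
      rw [if_neg (by omega), if_neg (by omega), if_neg (by push_cast; omega), if_neg (by omega)]

theorem A_outer (x : Int) : ∀ (n : Nat), (n : Int) ≤ x →
    DE ((PySem.List.pyRange 2 ((n : Int) + 1) 1).foldl (stepA x) (seedD, seedE)) (aval x n) := by
  intro n
  induction n with
  | zero =>
    intro _
    rw [PySem.List.pyRange_one_eq_nil (by norm_num)]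
    exact DE_congr seed_DE (fun j => (aval_zero x j).symm)
  | succ n ih =>
    intro hx
    rcases Nat.eq_zero_or_pos n with rfl | hn
    · rw [PySem.List.pyRange_one_eq_nil (by norm_num)]
      exact DE_congr seed_DE (fun j => (aval_one x j).symm)
    · have hcast : ((n + 1 : Nat) : Int) + 1 = ((n : Int) + 1) + 1 := by push_cast; ring
      have hx' : (n : Int) + 1 ≤ x := by push_cast at hx; omega
      rw [hcast, PySem.List.pyRange_one_succ_right (by omega), List.foldl_append]
      simp only [List.foldl_cons, List.foldl_nil]
      exact stepA_inv x n hn hx' (ih (by omega))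

-- ---------- final glue ----------
-- ---------- final glue ----------

theorem out_eq {stA stB : CSt} {G : Int → Option (Int × String)} (hA : DE stA G) (hB : DE stB G) :
    (PySem.List.sorted stA.1.keys (fun k => k) false).map (fun i => (stA.1.getD i 0, stA.2.getD i "")) =
    (PySem.List.sorted stB.1.keys (fun k => k) false).map (fun i => (stB.1.getD i 0, stB.2.getD i "")) := by
  obtain ⟨a1, a2, a3, _⟩ := hA
  obtain ⟨b1, b2, b3, _⟩ := hB
  have hmem : ∀ k, k ∈ stA.1.keys ↔ k ∈ stB.1.keys := by
    intro k
    rw [← not_iff_not, ← PySem.Dict.get?_eq_none_iff_not_mem_keys,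
      ← PySem.Dict.get?_eq_none_iff_not_mem_keys, a1 k, b1 k]
  have hperm : stA.1.keys.Perm stB.1.keys := (List.perm_ext_iff_of_nodup a3 b3).mpr hmem
  have hsorted : PySem.List.sorted stA.1.keys (fun k => k) false =
      PySem.List.sorted stB.1.keys (fun k => k) false :=
    PySem.List.sorted_eq_sorted_of_perm _ _ _ (fun _ _ h => h) hperm
  rw [hsorted]
  refine List.map_congr_left (fun i _ => ?_)
  have hd : stA.1.getD i 0 = stB.1.getD i 0 := by
    rw [PySem.Dict.getD_eq_get?_getD, PySem.Dict.getD_eq_get?_getD, a1 i, b1 i]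
  have he : stA.2.getD i "" = stB.2.getD i "" := by
    rw [PySem.Dict.getD_eq_get?_getD, PySem.Dict.getD_eq_get?_getD, a2 i, b2 i]
  rw [hd, he]


-- ===== VERDICT (by name: the statement is the Claim_ definition above) =====
theorem complexities_spec : Claim_equal_complexities := by
  intro x _
  unfold Spec_complexities
  by_cases hx : x < 2
  · simp only [complexities, complexities_alt]
    rw [PySem.List.pyRange_one_eq_nil (by omega)]
    rfl
  · have hn : ((x.toNat : Nat) : Int) = x := by omega
    have hA := A_outer x x.toNat (by omega)
    have hB := B_outer x.toNat
    rw [hn] at hA hB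
    have hG : ∀ j, aval x x.toNat j = tab x.toNat j := by
      intro j
      unfold aval
      by_cases hj : j ≤ ((x.toNat : Nat) : Int)
      · rw [if_pos hj]
      · rw [if_neg hj, if_neg (by omega), tab_gt _ _ (by omega)]
    have hA' := DE_congr hA hG
    simp only [complexities, complexities_alt]
    exact out_eq hA' hB
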